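-- pv_equiv track=rewrite | github.com/solpbc/solstone | solstone/convey/config.py | apply_app_order
-- ===== SOURCE A (Python) =====
-- from typing import Any
--
-- def apply_app_order(apps: dict[str, Any], config: dict) -> dict[str, Any]:
--     """Apply custom ordering from config to app dict.
--
--     Groups apps by starred status, then applies ordering within each group.
--     Starred apps appear first, followed by unstarred apps.
--
--     Args:
--         apps: Dict mapping app name to app data
--         config: Config dict with optional apps.order and apps.starred fields
--
--     Returns:
--         Reordered dict (starred apps first in order, then unstarred apps in order)
--     """
--     order = config.get("apps", {}).get("order", [])
--     starred = set(config.get("apps", {}).get("starred", []))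
--
--     # Separate apps into starred and unstarred
--     starred_apps = {}
--     unstarred_apps = {}
--
--     for name, data in apps.items():
--         if name in starred:
--             starred_apps[name] = data
--         else:
--             unstarred_apps[name] = data
--
--     # Helper to order a subset of apps
--     def order_apps(app_dict: dict[str, Any], app_order: list[str]) -> dict[str, Any]:
--         ordered = {}
--         # Ordered items first (if they exist)
--         for name in app_order:
--             if name in app_dict:
--                 ordered[name] = app_dict[name]
--         # Remaining items alphabetically
--         ordered_names = set(app_order)
--         for name in sorted(app_dict.keys()):
--             if name not in ordered_names:
--                 ordered[name] = app_dict[name]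
--         return ordered
--
--     # Order each group
--     ordered_starred = order_apps(starred_apps, order) if starred_apps else {}
--     ordered_unstarred = order_apps(unstarred_apps, order) if unstarred_apps else {}
--
--     # Combine: starred first, then unstarred
--     result = {}
--     result.update(ordered_starred)
--     result.update(ordered_unstarred)
--
--     return result
-- ===== SOURCE B (Python) =====
-- def apply_app_order(apps, config):
--     cfg = config.get("apps", {})
--     order = cfg.get("order", [])
--     starred = set(cfg.get("starred", []))
--     order_pos = {}
--     for i, name in enumerate(order):
--         if name not in order_pos:
--             order_pos[name] = i
--     def key(name):
--         group = 0 if name in starred else 1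
--         if name in order_pos:
--             return (group, 0, order_pos[name], "")
--         return (group, 1, 0, name)
--     return {name: apps[name] for name in sorted(apps, key=key)}
-- ===== Notes on version B (the rewrite author's own statement) =====
-- stated objective: idiomatic
-- what changed: Replaces the starred/unstarred partition with per-group ordered-then-alphabetical dict rebuilding by one stable sort of all app names under a composite key (group, in-order flag, first order position, name).
import Mathlib
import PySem

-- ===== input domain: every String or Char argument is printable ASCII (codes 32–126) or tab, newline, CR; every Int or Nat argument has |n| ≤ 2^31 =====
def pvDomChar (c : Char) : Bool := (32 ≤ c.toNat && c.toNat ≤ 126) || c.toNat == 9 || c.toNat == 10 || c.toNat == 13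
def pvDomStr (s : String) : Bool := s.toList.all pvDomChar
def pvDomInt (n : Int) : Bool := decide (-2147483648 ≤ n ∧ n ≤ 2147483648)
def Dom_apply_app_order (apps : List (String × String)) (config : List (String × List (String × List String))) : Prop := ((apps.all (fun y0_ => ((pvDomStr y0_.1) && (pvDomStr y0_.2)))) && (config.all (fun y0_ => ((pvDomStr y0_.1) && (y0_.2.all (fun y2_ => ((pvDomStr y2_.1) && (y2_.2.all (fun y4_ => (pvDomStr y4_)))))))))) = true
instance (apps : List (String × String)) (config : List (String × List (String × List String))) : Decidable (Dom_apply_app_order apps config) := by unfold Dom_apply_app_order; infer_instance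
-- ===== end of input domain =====

-- B replaces A's partition-and-rebuild (starred/unstarred dicts, each reordered by config order then alphabetically)
-- with one stable sort of all app names under a composite key (group, in-order flag, first order position, name); same cost, more idiomatic.


-- ===== PORT A =====
-- string sort key, shared by both ports: Python's '<' on str is code-point lexicographic (PYSEM), which is exactly
-- '<' on the list of code points; List Int is kernel-reducible where String's own order is not.
def pvStrKey (n : String) : List Int := n.toList.map (fun c => (c.toNat : Int))

-- helper order_apps: ordered items first (config order), then remaining keys alphabetically (sorted(keys) via pvStrKey).
def pvOrderAppsA (d : PySem.Dict String String) (ord : List String) : PySem.Dict String String :=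
  let ordered := ord.foldl (fun (acc : PySem.Dict String String) name =>
      match d.get? name with              -- 'if name in app_dict: ordered[name] = app_dict[name]'
      | some v => acc.insert name v
      | none => acc) PySem.Dict.empty
  let orderedNames : PySem.Set String := PySem.Set.ofList ord
  (PySem.List.sorted d.keys pvStrKey).foldl (fun (acc : PySem.Dict String String) name =>
      if PySem.Set.contains orderedNames name then acc
      else match d.get? name with          -- name ∈ d.keys here, so get? is some
           | some v => acc.insert name v
           | none => acc) ordered

def apply_app_order (apps : List (String × String)) (config : List (String × List (String × List String))) : List (String × String) :=
  let cfgApps : List (String × List String) := (PySem.Dict.mk config).getD "apps" []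
  let order : List String := (PySem.Dict.mk cfgApps).getD "order" []
  let starred : PySem.Set String := PySem.Set.ofList ((PySem.Dict.mk cfgApps).getD "starred" [])
  let part := apps.foldl (fun (p : PySem.Dict String String × PySem.Dict String String) x =>
      if PySem.Set.contains starred x.1 then (p.1.insert x.1 x.2, p.2) else (p.1, p.2.insert x.1 x.2))
      (PySem.Dict.empty, PySem.Dict.empty)
  let ordered_starred := if part.1.items.isEmpty then PySem.Dict.empty else pvOrderAppsA part.1 order
  let ordered_unstarred := if part.2.items.isEmpty then PySem.Dict.empty else pvOrderAppsA part.2 order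
  let result := ordered_unstarred.items.foldl (fun (r : PySem.Dict String String) p => r.insert p.1 p.2)
      (ordered_starred.items.foldl (fun (r : PySem.Dict String String) p => r.insert p.1 p.2) PySem.Dict.empty)
  result.items

-- ===== PORT B =====
-- composite sort key: the Python tuple (group, flag, pos, name) is encoded as the List Int
-- [group, flag, pos] ++ code points of name — lexicographic comparison of these lists is exactly
-- Python's comparison of those tuples (the name slot is compared only when the flags agree, where
-- the other slots coincide: "" ↦ [] and pos ↦ [pos]).
def pvKeyB (starred : PySem.Set String) (orderPos : PySem.Dict String Int) (name : String) : List Int :=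
  let group : Int := if PySem.Set.contains starred name then 0 else 1
  match orderPos.get? name with
  | some i => [group, 0, i]
  | none => [group, 1, 0] ++ pvStrKey name

def apply_app_order_alt (apps : List (String × String)) (config : List (String × List (String × List String))) : List (String × String) :=
  let cfgApps : List (String × List String) := (PySem.Dict.mk config).getD "apps" []
  let order : List String := (PySem.Dict.mk cfgApps).getD "order" []
  let starred : PySem.Set String := PySem.Set.ofList ((PySem.Dict.mk cfgApps).getD "starred" [])
  let orderPos := (PySem.List.enumerate order 0).foldl
      (fun (d : PySem.Dict String Int) p => if d.contains p.2 then d else d.insert p.2 p.1) PySem.Dict.empty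
  let appsD := PySem.Dict.mk apps
  let names := PySem.List.sorted appsD.keys (pvKeyB starred orderPos)
  (names.foldl (fun (r : PySem.Dict String String) n =>
      match appsD.get? n with              -- n is a key of apps, so get? is some
      | some v => r.insert n v
      | none => r) PySem.Dict.empty).items

-- ===== PRECONDITION & SPEC =====
-- apps models a Python dict, whose keys are unique: an association list with duplicate keys corresponds to
-- no Python input of A, so Pre_ restricts apps to lists with pairwise-distinct keys (config needs no restriction:
-- both ports use first-match lookup on it).
def Pre_apply_app_order (apps : List (String × String)) (config : List (String × List (String × List String))) : Prop :=
  (apps.map Prod.fst).Nodup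
instance (apps : List (String × String)) (config : List (String × List (String × List String))) : Decidable (Pre_apply_app_order apps config) := by unfold Pre_apply_app_order; infer_instance
def pvWitness_apply_app_order : (List (String × String)) × (List (String × List (String × List String))) :=
  ([("b", "1"), ("a", "2"), ("c", "3")], [("apps", [("order", ["a"]), ("starred", ["b"])])])

def Spec_apply_app_order (apps : List (String × String)) (config : List (String × List (String × List String))) (out : List (String × String)) : Prop := out = apply_app_order_alt apps config
instance (apps : List (String × String)) (config : List (String × List (String × List String))) (out : List (String × String)) : Decidable (Spec_apply_app_order apps config out) := by unfold Spec_apply_app_order; infer_instance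

-- ===== CLAIM (what is proved, stated in full; the proofs are below) =====
def Claim_equal_apply_app_order : Prop := ∀ (apps : List (String × String)) (config : List (String × List (String × List String))), Dom_apply_app_order apps config → Pre_apply_app_order apps config → Spec_apply_app_order apps config (apply_app_order apps config)

-- ===== LEMMAS AND PROOFS =====

-- Inserting a key with the value the dict already holds is a no-op (dict overwrite keeps position).
theorem pvInsert_self_eq (d : PySem.Dict String String) (k : String) (v : String)
    (hd : d.keys.Nodup) (h : d.get? k = some v) : d.insert k v = d := by
  apply PySem.Dict.ext
  have hc : d.contains k = true := by rw [PySem.Dict.contains_eq_isSome_get?, h]; rfl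
  rw [PySem.Dict.items_insert_of_contains d v hc]
  have : ∀ p ∈ d.items, (if (p.1 == k) = true then (k, v) else p) = p := by
    intro p hp
    obtain ⟨a, b⟩ := p
    by_cases hk : a = k
    · subst hk
      have hget : d.get? a = some b := PySem.Dict.get?_of_mem_items d hp hd
      rw [h] at hget
      simp_all
    · simp [hk]
  rw [List.map_congr_left this, List.map_id']

-- lookup in a key-filtered dict agrees with the unfiltered dict on keys the filter keeps
theorem pvGet?_mk_filter {ν : Type} (l : List (String × ν)) (q : String → Bool) (n : String) (hq : q n = true) :
    (PySem.Dict.mk (l.filter (fun x => q x.1))).get? n = (PySem.Dict.mk l).get? n := by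
  induction l with
  | nil => rfl
  | cons a rest ih =>
    by_cases ha : a.1 = n
    · have : q a.1 = true := by rw [ha]; exact hq
      simp only [List.filter_cons, this, if_true]
      rw [PySem.Dict.get?_mk_cons, PySem.Dict.get?_mk_cons]
      simp [ha]
    · by_cases hqa : q a.1 = true
      · simp only [List.filter_cons, hqa, if_true]
        rw [PySem.Dict.get?_mk_cons, PySem.Dict.get?_mk_cons]
        have : (a.1 == n) = false := by simp [ha]
        simp only [this, Bool.false_eq_true, if_false, ih]
      · simp only [List.filter_cons, hqa, if_false]
        rw [PySem.Dict.get?_mk_cons]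
        have : (a.1 == n) = false := by simp [ha]
        simp only [this, Bool.false_eq_true, if_false, ih]

-- the body of the two order_apps loops (and of B's final rebuild loop)
def pvOrdStep (d : PySem.Dict String String) (acc : PySem.Dict String String) (name : String) :
    PySem.Dict String String :=
  match d.get? name with
  | some v => acc.insert name v
  | none => acc

theorem pvOrdStep_keep (d acc : PySem.Dict String String) (m n : String) (v : String)
    (hacc : acc.get? n = some v) (hd : d.get? n = some v) :
    (pvOrdStep d acc m).get? n = some v := by
  unfold pvOrdStep
  cases hm : d.get? m with
  | none => exact hacc
  | some w =>
    by_cases hnm : n = m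
    · subst hnm; rw [hd] at hm; cases hm; exact PySem.Dict.get?_insert_self acc n v
    · rw [PySem.Dict.get?_insert_of_ne acc w hnm]; exact hacc

theorem pvFoldOrd_keep (d : PySem.Dict String String) (n : String) (v : String)
    (ord : List String) : ∀ acc : PySem.Dict String String, acc.get? n = some v → d.get? n = some v →
    (ord.foldl (pvOrdStep d) acc).get? n = some v := by
  induction ord with
  | nil => intro acc h _; exact h
  | cons m rest ih =>
    intro acc hacc hd
    exact ih (pvOrdStep d acc m) (pvOrdStep_keep d acc m n v hacc hd) hd

theorem pvOrdStep_inv (d acc : PySem.Dict String String) (m : String)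
    (hinv : ∀ p q, acc.get? p = some q → d.get? p = some q) :
    ∀ p q, (pvOrdStep d acc m).get? p = some q → d.get? p = some q := by
  intro p q h
  unfold pvOrdStep at h
  cases hm : d.get? m with
  | none => rw [hm] at h; exact hinv p q h
  | some w =>
    rw [hm] at h
    by_cases hpm : p = m
    · subst hpm; rw [PySem.Dict.get?_insert_self] at h; cases h; exact hm
    · rw [PySem.Dict.get?_insert_of_ne acc w hpm] at h; exact hinv p q h

theorem pvOrdStep_nodup (d acc : PySem.Dict String String) (m : String)
    (h : acc.keys.Nodup) : (pvOrdStep d acc m).keys.Nodup := by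
  unfold pvOrdStep
  cases d.get? m with
  | none => exact h
  | some w => exact PySem.Dict.nodup_keys_insert acc m w h

theorem pvFoldOrd_nodup (d : PySem.Dict String String) (ord : List String) :
    ∀ acc : PySem.Dict String String, acc.keys.Nodup → (ord.foldl (pvOrdStep d) acc).keys.Nodup := by
  induction ord with
  | nil => intro acc h; exact h
  | cons m rest ih => intro acc h; exact ih _ (pvOrdStep_nodup d acc m h)

theorem pvFoldOrd_mem_get? (d : PySem.Dict String String) (n : String) (v : String)
    (ord : List String) : ∀ acc : PySem.Dict String String, n ∈ ord → d.get? n = some v →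
    (∀ p q, acc.get? p = some q → d.get? p = some q) →
    (ord.foldl (pvOrdStep d) acc).get? n = some v := by
  induction ord with
  | nil => intro _ h; simp at h
  | cons m rest ih =>
    intro acc hmem hd hinv
    by_cases hrest : n ∈ rest
    · exact ih _ hrest hd (pvOrdStep_inv d acc m hinv)
    · have hnm : n = m := by
        rcases List.mem_cons.mp hmem with h | h
        · exact h
        · exact absurd h hrest
      subst hnm
      have hstep : (pvOrdStep d acc n).get? n = some v := by
        unfold pvOrdStep; rw [hd]; exact PySem.Dict.get?_insert_self acc n v
      show (rest.foldl (pvOrdStep d) (pvOrdStep d acc n)).get? n = some v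
      exact pvFoldOrd_keep d n v rest _ hstep hd

-- duplicates in the order list are no-ops: the fold over ord equals the fold over its ordered dedup
theorem pvFoldOrd_dedup (d : PySem.Dict String String) (hd : d.keys.Nodup)
    (ord : List String) : ∀ acc : PySem.Dict String String,
    (∀ p q, acc.get? p = some q → d.get? p = some q) → acc.keys.Nodup →
    ord.foldl (pvOrdStep d) acc = (PySem.Set.ofList ord).foldl (pvOrdStep d) acc := by
  induction ord using List.reverseRecOn with
  | nil => intro acc _ _; rfl
  | append_singleton ord m ih =>
    intro acc hinv hnd
    rw [List.foldl_append, PySem.Set.ofList_append_singleton, ih acc hinv hnd]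
    by_cases hm : m ∈ ord
    · have hm' : m ∈ PySem.Set.ofList ord := (PySem.Set.mem_ofList ord m).mpr hm
      rw [PySem.Set.add_of_mem hm']
      set X := (PySem.Set.ofList ord).foldl (pvOrdStep d) acc with hX
      simp only [List.foldl_cons, List.foldl_nil]
      unfold pvOrdStep
      cases hdm : d.get? m with
      | none => rfl
      | some v =>
        have hXm : X.get? m = some v :=
          pvFoldOrd_mem_get? d m v (PySem.Set.ofList ord) acc hm' hdm hinv
        have hXnd : X.keys.Nodup := pvFoldOrd_nodup d (PySem.Set.ofList ord) acc hnd
        exact pvInsert_self_eq X m v hXnd hXm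
    · have hm' : m ∉ PySem.Set.ofList ord := fun h => hm ((PySem.Set.mem_ofList ord m).mp h)
      rw [PySem.Set.add_of_not_mem hm', List.foldl_append]

theorem pvOrdStep_eq_ite (d acc : PySem.Dict String String) (n : String) :
    pvOrdStep d acc n = if d.contains n then acc.insert n ((d.get? n).getD "") else acc := by
  unfold pvOrdStep
  rw [PySem.Dict.contains_eq_isSome_get?]
  cases h : d.get? n with
  | none => simp
  | some v => simp [PySem.Dict.getD_eq_get?_getD, h]

-- folding the order_apps step over distinct fresh names appends exactly the present ones
theorem pvFoldOrd_items (d : PySem.Dict String String) (l : List String) (hl : l.Nodup)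
    (acc : PySem.Dict String String) (hfresh : ∀ n ∈ l, acc.contains n = false) :
    (l.foldl (pvOrdStep d) acc).items
      = acc.items ++ (l.filter (fun n => d.contains n)).map (fun n => (n, (d.get? n).getD "")) := by
  rw [PySem.List.foldl_congr_mem l (pvOrdStep d)
      (fun acc n => if d.contains n then acc.insert n ((d.get? n).getD "") else acc) acc
      (fun acc n _ => pvOrdStep_eq_ite d acc n)]
  rw [PySem.List.foldl_if_eq_foldl_filter (fun n => d.contains n)
      (fun acc n => acc.insert n ((d.get? n).getD "")) l acc]
  rw [PySem.Dict.items_foldl_insert_fresh (l.filter (fun n => d.contains n))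
      (fun n => n) (fun n => (d.get? n).getD "") acc
      (fun n hn => hfresh n (List.mem_of_mem_filter hn))
      (by simpa using hl.filter _)]

-- characterization of order_apps: config-ordered present names first, then remaining keys alphabetically
theorem pvOrderAppsA_items (d : PySem.Dict String String) (hd : d.keys.Nodup) (ord : List String) :
    (pvOrderAppsA d ord).items =
      ((PySem.Set.ofList ord).filter (fun n => d.contains n)).map (fun n => (n, (d.get? n).getD ""))
      ++ ((PySem.List.sorted d.keys pvStrKey).filter
            (fun n => !(PySem.Set.contains (PySem.Set.ofList ord) n))).map
          (fun n => (n, (d.get? n).getD "")) := by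
  unfold pvOrderAppsA
  have hfirst : ord.foldl (pvOrdStep d) PySem.Dict.empty
      = (PySem.Set.ofList ord).foldl (pvOrdStep d) PySem.Dict.empty := by
    apply pvFoldOrd_dedup d hd ord PySem.Dict.empty
    · intro p q h; rw [PySem.Dict.get?_empty] at h; cases h
    · exact PySem.Dict.nodup_keys_empty
  have hempty : ∀ n ∈ PySem.Set.ofList ord, (PySem.Dict.empty : PySem.Dict String String).contains n = false := by
    intro n _; exact PySem.Dict.contains_empty n
  have hOI : (ord.foldl (pvOrdStep d) PySem.Dict.empty).items
      = ((PySem.Set.ofList ord).filter (fun n => d.contains n)).map (fun n => (n, (d.get? n).getD "")) := by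
    rw [hfirst, pvFoldOrd_items d (PySem.Set.ofList ord) (PySem.Set.nodup_ofList ord) PySem.Dict.empty hempty]
    rfl
  set ordered := ord.foldl (pvOrdStep d) PySem.Dict.empty with hordset
  -- second loop
  set names := PySem.List.sorted d.keys pvStrKey with hnames
  have hnamesnd : names.Nodup := (PySem.List.sorted_perm d.keys pvStrKey false).symm.nodup hd
  have hcong : ∀ (acc : PySem.Dict String String), ∀ n ∈ names,
      (if PySem.Set.contains (PySem.Set.ofList ord) n then acc
       else pvOrdStep d acc n)
      = if (!(PySem.Set.contains (PySem.Set.ofList ord) n)) = true then pvOrdStep d acc n else acc := by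
    intro acc n _
    cases PySem.Set.contains (PySem.Set.ofList ord) n <;> simp
  have hbody : (names.foldl (fun acc n =>
        if PySem.Set.contains (PySem.Set.ofList ord) n then acc else pvOrdStep d acc n) ordered)
      = (names.filter (fun n => !(PySem.Set.contains (PySem.Set.ofList ord) n))).foldl (pvOrdStep d) ordered := by
    rw [PySem.List.foldl_congr_mem names _ _ ordered hcong]
    exact PySem.List.foldl_if_eq_foldl_filter (fun n => !(PySem.Set.contains (PySem.Set.ofList ord) n)) (pvOrdStep d) names ordered
  have hfresh2 : ∀ n ∈ names.filter (fun n => !(PySem.Set.contains (PySem.Set.ofList ord) n)),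
      ordered.contains n = false := by
    intro n hn
    rw [List.mem_filter] at hn
    obtain ⟨-, hno⟩ := hn
    by_contra hcon
    have hc : ordered.contains n = true := by
      cases h : ordered.contains n
      · exact absurd h hcon
      · rfl
    have hmemk : n ∈ ordered.keys := (PySem.Dict.contains_iff_mem_keys ordered n).mp hc
    have : ordered.keys = ((PySem.Set.ofList ord).filter (fun n => d.contains n)).map (fun n => n) := by
      simp only [PySem.Dict.keys, hOI, List.map_map]
      rfl
    rw [this] at hmemk
    simp only [List.map_id'] at hmemk
    have : n ∈ PySem.Set.ofList ord := List.mem_of_mem_filter hmemk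
    have : PySem.Set.contains (PySem.Set.ofList ord) n = true :=
      (PySem.Set.contains_iff _ _).mpr this
    rw [this] at hno
    cases hno
  have hfilter_all : (names.filter (fun n => !(PySem.Set.contains (PySem.Set.ofList ord) n))).filter
      (fun n => d.contains n) = names.filter (fun n => !(PySem.Set.contains (PySem.Set.ofList ord) n)) := by
    rw [List.filter_eq_self]
    intro n hn
    have : n ∈ names := List.mem_of_mem_filter hn
    have hk : n ∈ d.keys := (PySem.List.mem_sorted d.keys pvStrKey false n).mp this
    exact (PySem.Dict.contains_iff_mem_keys d n).mpr hk
  show (names.foldl (fun acc n => if PySem.Set.contains (PySem.Set.ofList ord) n then acc else pvOrdStep d acc n) ordered).items = _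
  rw [hbody, pvFoldOrd_items d _ (hnamesnd.filter _) ordered hfresh2, hfilter_all, hOI]

-- a fresh-key insert literally appends the pair
theorem pvInsert_fresh_mk (d : PySem.Dict String String) (k v : String)
    (h : d.contains k = false) : d.insert k v = PySem.Dict.mk (d.items ++ [(k, v)]) := by
  apply PySem.Dict.ext
  rw [PySem.Dict.items_insert_of_not_contains d v h]

-- A's partition loop separates apps into the starred and unstarred association lists
theorem pvPartition_eq (q : String → Bool) (l : List (String × String)) :
    ∀ (d₁ d₂ : PySem.Dict String String),
    (∀ x ∈ l, d₁.contains x.1 = false) → (∀ x ∈ l, d₂.contains x.1 = false) →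
    (l.map Prod.fst).Nodup →
    l.foldl (fun p x => if q x.1 then (p.1.insert x.1 x.2, p.2) else (p.1, p.2.insert x.1 x.2)) (d₁, d₂)
      = (PySem.Dict.mk (d₁.items ++ l.filter (fun x => q x.1)),
         PySem.Dict.mk (d₂.items ++ l.filter (fun x => !q x.1))) := by
  induction l with
  | nil =>
    intro d₁ d₂ _ _ _
    simp only [List.foldl_nil, List.filter_nil, List.append_nil]
  | cons a rest ih =>
    intro d₁ d₂ h₁ h₂ hnd
    have hnd' : (rest.map Prod.fst).Nodup := (List.nodup_cons.mp (by simpa using hnd)).2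
    have hane : ∀ x ∈ rest, x.1 ≠ a.1 := by
      intro x hx heq
      have : a.1 ∉ rest.map Prod.fst := (List.nodup_cons.mp (by simpa using hnd)).1
      exact this (heq ▸ List.mem_map_of_mem hx)
    cases hq : q a.1 with
    | true =>
      simp only [List.foldl_cons, hq, List.filter_cons, Bool.not_true, Bool.not_false,
        if_true, Bool.false_eq_true, Bool.true_eq_false, if_false]
      have hd1 : d₁.contains a.1 = false := h₁ a (List.mem_cons_self)
      rw [pvInsert_fresh_mk d₁ a.1 a.2 hd1]
      have hfresh1 : ∀ x ∈ rest, (PySem.Dict.mk (d₁.items ++ [(a.1, a.2)])).contains x.1 = false := by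
        intro x hx
        rw [← pvInsert_fresh_mk d₁ a.1 a.2 hd1, PySem.Dict.contains_insert]
        have : (x.1 == a.1) = false := by simp [hane x hx]
        rw [this, Bool.false_or]
        exact h₁ x (List.mem_cons_of_mem a hx)
      rw [ih _ d₂ hfresh1 (fun x hx => h₂ x (List.mem_cons_of_mem a hx)) hnd']
      simp [List.append_assoc]
    | false =>
      simp only [List.foldl_cons, hq, List.filter_cons, Bool.not_true, Bool.not_false,
        if_true, Bool.false_eq_true, Bool.true_eq_false, if_false]
      have hd2 : d₂.contains a.1 = false := h₂ a (List.mem_cons_self)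
      rw [pvInsert_fresh_mk d₂ a.1 a.2 hd2]
      have hfresh2 : ∀ x ∈ rest, (PySem.Dict.mk (d₂.items ++ [(a.1, a.2)])).contains x.1 = false := by
        intro x hx
        rw [← pvInsert_fresh_mk d₂ a.1 a.2 hd2, PySem.Dict.contains_insert]
        have : (x.1 == a.1) = false := by simp [hane x hx]
        rw [this, Bool.false_or]
        exact h₂ x (List.mem_cons_of_mem a hx)
      rw [ih d₁ _ (fun x hx => h₁ x (List.mem_cons_of_mem a hx)) hfresh2 hnd']
      simp [List.append_assoc]

-- A's result.update loops: inserting pairwise-fresh pairs appends them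
theorem pvCombine_items (l : List (String × String)) (acc : PySem.Dict String String)
    (hfresh : ∀ x ∈ l, acc.contains x.1 = false) (hnd : (l.map Prod.fst).Nodup) :
    (l.foldl (fun r p => r.insert p.1 p.2) acc).items = acc.items ++ l := by
  rw [PySem.Dict.items_foldl_insert_fresh l Prod.fst Prod.snd acc hfresh hnd]
  simp

-- B's order_pos dict holds the first position of each name in order
theorem pvOrderPos_get? (ord : List String) : ∀ (n : String),
    ((PySem.List.enumerate ord 0).foldl
        (fun d p => if d.contains p.2 then d else d.insert p.2 p.1) PySem.Dict.empty).get? n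
      = (PySem.List.index? ord n).map (fun k => (k : Int)) := by
  induction ord using List.reverseRecOn with
  | nil =>
    intro n
    simp [PySem.List.enumerate_nil, PySem.List.index?_eq_idxOf?, PySem.Dict.get?_empty, List.idxOf?_nil]
  | append_singleton ord x ih =>
    intro n
    rw [PySem.List.enumerate_append, List.foldl_append]
    have hen : PySem.List.enumerate [x] (0 + (ord.length : Int)) = [((ord.length : Int), x)] := by
      rw [PySem.List.enumerate_cons, PySem.List.enumerate_nil]
      norm_num
    rw [hen]
    set D := (PySem.List.enumerate ord 0).foldl
        (fun d p => if d.contains p.2 then d else d.insert p.2 p.1) PySem.Dict.empty with hD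
    simp only [List.foldl_cons, List.foldl_nil]
    have hcontains : D.contains x = ((PySem.List.index? ord x).isSome) := by
      rw [PySem.Dict.contains_eq_isSome_get?, ih x]
      cases PySem.List.index? ord x <;> rfl
    by_cases hx : x ∈ ord
    · have hc : D.contains x = true := by
        rw [hcontains]
        rw [(PySem.List.index?_isSome_iff ord x)]
        exact hx
      simp only [hc, if_true]
      rw [ih n]
      by_cases hmem : n ∈ ord
      · rw [PySem.List.index?_append_of_mem [x] hmem]
      · have hnx : n ≠ x := fun h => hmem (h ▸ hx)
        have h1 : PySem.List.index? ord n = none := (PySem.List.index?_eq_none_iff ord n).mpr hmem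
        have h2 : PySem.List.index? (ord ++ [x]) n = none := by
          rw [PySem.List.index?_eq_none_iff]
          simp [hmem, hnx]
        rw [h1, h2]
    · have hc : D.contains x = false := by
        rw [hcontains]
        have : PySem.List.index? ord x = none := (PySem.List.index?_eq_none_iff ord x).mpr hx
        rw [this]; rfl
      simp only [hc, Bool.false_eq_true, if_false]
      by_cases hnx : n = x
      · subst hnx
        rw [PySem.Dict.get?_insert_self, PySem.List.index?_append_singleton_self ord n hx]
        rfl
      · rw [PySem.Dict.get?_insert, if_neg hnx, ih n]
        by_cases hmem : n ∈ ord
        · rw [PySem.List.index?_append_of_mem [x] hmem]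
        · have h1 : PySem.List.index? ord n = none := (PySem.List.index?_eq_none_iff ord n).mpr hmem
          have h2 : PySem.List.index? (ord ++ [x]) n = none := by
            rw [PySem.List.index?_eq_none_iff]
            simp [hmem, fun h => hnx h]
          rw [h1, h2]

theorem pvIdxOf?_mem (l : List String) (a : String) (h : a ∈ l) : l.idxOf? a = some (l.idxOf a) := by
  induction l with
  | nil => simp at h
  | cons x xs ih =>
    by_cases hx : x = a
    · subst hx; simp [List.idxOf?_cons, List.idxOf_cons_self]
    · rw [List.idxOf_cons_ne _ hx]
      simp only [List.mem_cons] at h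
      rcases h with h | h
      · exact absurd h.symm hx
      · simp [List.idxOf?_cons, hx, ih h]

theorem pvIndex?_mem (l : List String) (a : String) (h : a ∈ l) :
    PySem.List.index? l a = some (l.idxOf a) := by
  rw [PySem.List.index?_eq_idxOf?]; exact pvIdxOf?_mem l a h

-- the ordered dedup of ord is strictly increasing in first-occurrence position
theorem pvOfList_pairwise_idxOf (ord : List String) :
    (PySem.Set.ofList ord).Pairwise (fun a b => ord.idxOf a < ord.idxOf b) := by
  induction ord using List.reverseRecOn with
  | nil => simp [PySem.Set.ofList]
  | append_singleton ord x ih =>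
    rw [PySem.Set.ofList_append_singleton]
    by_cases hx : x ∈ ord
    · rw [PySem.Set.add_of_mem ((PySem.Set.mem_ofList ord x).mpr hx)]
      refine ih.imp_of_mem ?_
      intro a b ha hb hlt
      have ha' : a ∈ ord := (PySem.Set.mem_ofList ord a).mp ha
      have hb' : b ∈ ord := (PySem.Set.mem_ofList ord b).mp hb
      rw [List.idxOf_append, List.idxOf_append, if_pos ha', if_pos hb']
      exact hlt
    · rw [PySem.Set.add_of_not_mem (fun h => hx ((PySem.Set.mem_ofList ord x).mp h))]
      rw [List.pairwise_append]
      refine ⟨?_, List.pairwise_singleton _ _, ?_⟩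
      · refine ih.imp_of_mem ?_
        intro a b ha hb hlt
        have ha' : a ∈ ord := (PySem.Set.mem_ofList ord a).mp ha
        have hb' : b ∈ ord := (PySem.Set.mem_ofList ord b).mp hb
        rw [List.idxOf_append, List.idxOf_append, if_pos ha', if_pos hb']
        exact hlt
      · intro a ha b hb
        rw [List.mem_singleton] at hb
        subst hb
        have ha' : a ∈ ord := (PySem.Set.mem_ofList ord a).mp ha
        rw [List.idxOf_append, List.idxOf_append, if_pos ha', if_neg hx,
          List.idxOf_cons_self]
        calc ord.idxOf a < ord.length := List.idxOf_lt_length_of_mem ha'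
        _ ≤ 0 + ord.length := by omega

theorem pvStrKey_inj (a b : String) (h : pvStrKey a = pvStrKey b) : a = b := by
  unfold pvStrKey at h
  apply String.toList_injective
  have hinj : Function.Injective (fun c : Char => (c.toNat : Int)) := by
    intro c d hcd
    simp only [Int.natCast_inj] at hcd
    exact Char.ext (UInt32.toNat_inj.mp hcd)
  exact List.map_injective_iff.mpr hinj h

-- B-side proof-only abbreviations
def pvOrderPosD (ord : List String) : PySem.Dict String Int :=
  (PySem.List.enumerate ord 0).foldl
    (fun d p => if d.contains p.2 then d else d.insert p.2 p.1) PySem.Dict.empty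

theorem pvSorted_instEq (xs : List String) (key : String → List Int) :
    @PySem.List.sorted String (List Int) List.instLT (fun a b => a.decidableLT b) xs key false
      = @PySem.List.sorted String (List Int) List.instLinearOrder.toLT (@LinearOrder.toDecidableLT _ _) xs key false := by
  have h : (fun a b : List Int => a.decidableLT b) = (@LinearOrder.toDecidableLT (List Int) _) := by
    funext a b; exact Subsingleton.elim _ _
  exact congrArg (fun i => @PySem.List.sorted String (List Int) List.instLT i xs key false) h

theorem pvSorted_pairwise' (xs : List String) (key : String → List Int) :
    (PySem.List.sorted xs key).Pairwise (fun a b => key a ≤ key b) := by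
  rw [pvSorted_instEq]
  exact PySem.List.sorted_pairwise xs key

theorem pvSorted_eq_of_perm_of_pairwise_lt' (xs ys : List String) (key : String → List Int)
    (hperm : ys.Perm xs) (hpw : ys.Pairwise (fun a b => key a < key b)) :
    PySem.List.sorted xs key = ys := by
  rw [pvSorted_instEq]
  exact PySem.List.sorted_eq_of_perm_of_pairwise_lt xs ys key hperm hpw

def pvGroupNames (apps : List (String × String)) (ord : List String) (q : String → Bool) : List String :=
  (PySem.Set.ofList ord).filter (fun n => decide (n ∈ apps.map Prod.fst) && q n)
  ++ (PySem.List.sorted ((apps.map Prod.fst).filter q) pvStrKey).filter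
       (fun n => !(PySem.Set.contains (PySem.Set.ofList ord) n))

def pvNames (apps : List (String × String)) (ord sl : List String) : List String :=
  pvGroupNames apps ord (fun n => PySem.Set.contains (PySem.Set.ofList sl) n)
  ++ pvGroupNames apps ord (fun n => !(PySem.Set.contains (PySem.Set.ofList sl) n))

theorem pvKeyB_ord (sl ord : List String) (n : String) (h : n ∈ ord) :
    pvKeyB (PySem.Set.ofList sl) (pvOrderPosD ord) n
      = [(if PySem.Set.contains (PySem.Set.ofList sl) n then (0:Int) else 1), 0, (ord.idxOf n : Int)] := by
  unfold pvKeyB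
  have : (pvOrderPosD ord).get? n = some ((ord.idxOf n : Int)) := by
    unfold pvOrderPosD
    rw [pvOrderPos_get? ord n, pvIndex?_mem ord n h]
    rfl
  rw [this]

theorem pvKeyB_alpha (sl ord : List String) (n : String) (h : n ∉ ord) :
    pvKeyB (PySem.Set.ofList sl) (pvOrderPosD ord) n
      = [(if PySem.Set.contains (PySem.Set.ofList sl) n then (0:Int) else 1), 1, 0] ++ pvStrKey n := by
  unfold pvKeyB
  have : (pvOrderPosD ord).get? n = none := by
    unfold pvOrderPosD
    rw [pvOrderPos_get? ord n, (PySem.List.index?_eq_none_iff ord n).mpr h]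
    rfl
  rw [this]

theorem pvGroupNames_mem (apps : List (String × String)) (ord : List String) (q : String → Bool)
    (n : String) (h : n ∈ pvGroupNames apps ord q) : n ∈ apps.map Prod.fst ∧ q n = true := by
  unfold pvGroupNames at h
  rw [List.mem_append] at h
  rcases h with h | h
  · rw [List.mem_filter] at h
    obtain ⟨-, h⟩ := h
    simp only [Bool.and_eq_true, decide_eq_true_eq] at h
    exact h
  · rw [List.mem_filter] at h
    obtain ⟨h, -⟩ := h
    rw [PySem.List.mem_sorted] at h
    rw [List.mem_filter] at h
    exact h

theorem pvGroupNames_perm (apps : List (String × String)) (ord : List String) (q : String → Bool)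
    (hnd : (apps.map Prod.fst).Nodup) :
    (pvGroupNames apps ord q).Perm ((apps.map Prod.fst).filter q) := by
  set ks := apps.map Prod.fst with hks
  set g := ks.filter q with hg
  have hgnd : g.Nodup := hnd.filter q
  have hperm2 : ((PySem.List.sorted g pvStrKey).filter
      (fun n => !(PySem.Set.contains (PySem.Set.ofList ord) n))).Perm
      (g.filter (fun n => !(PySem.Set.contains (PySem.Set.ofList ord) n))) :=
    (PySem.List.sorted_perm g pvStrKey false).filter _
  have hperm1 : ((PySem.Set.ofList ord).filter (fun n => decide (n ∈ ks) && q n)).Perm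
      (g.filter (fun n => PySem.Set.contains (PySem.Set.ofList ord) n)) := by
    rw [List.perm_ext_iff_of_nodup ((PySem.Set.nodup_ofList ord).filter _) (hgnd.filter _)]
    intro a
    simp only [List.mem_filter, Bool.and_eq_true, decide_eq_true_eq, hg]
    rw [PySem.Set.mem_ofList, PySem.Set.contains_iff, PySem.Set.mem_ofList]
    tauto
  refine ((hperm1.append hperm2).trans ?_)
  exact List.filter_append_perm _ g

theorem pvNames_perm (apps : List (String × String)) (ord sl : List String)
    (hnd : (apps.map Prod.fst).Nodup) : (pvNames apps ord sl).Perm (apps.map Prod.fst) := by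
  unfold pvNames
  refine ((pvGroupNames_perm apps ord _ hnd).append (pvGroupNames_perm apps ord _ hnd)).trans ?_
  exact List.filter_append_perm _ _

theorem pvKeyB_head (sl ord : List String) (n : String) :
    ∃ t, pvKeyB (PySem.Set.ofList sl) (pvOrderPosD ord) n
      = (if PySem.Set.contains (PySem.Set.ofList sl) n then (0:Int) else 1) :: t := by
  unfold pvKeyB
  cases (pvOrderPosD ord).get? n
  · exact ⟨_, rfl⟩
  · exact ⟨_, rfl⟩

theorem pvGroup_pairwise (apps : List (String × String)) (ord sl : List String)
    (q : String → Bool) (gv : Int)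
    (hq : ∀ n, q n = true → (if PySem.Set.contains (PySem.Set.ofList sl) n then (0:Int) else 1) = gv)
    (hnd : (apps.map Prod.fst).Nodup) :
    (pvGroupNames apps ord q).Pairwise
      (fun a b => pvKeyB (PySem.Set.ofList sl) (pvOrderPosD ord) a
        < pvKeyB (PySem.Set.ofList sl) (pvOrderPosD ord) b) := by
  set ks := apps.map Prod.fst with hks
  unfold pvGroupNames
  rw [List.pairwise_append]
  refine ⟨?_, ?_, ?_⟩
  · -- config-ordered block: positions strictly increase
    refine ((pvOfList_pairwise_idxOf ord).filter _).imp_of_mem ?_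
    intro a b ha hb hlt
    rw [List.mem_filter] at ha hb
    obtain ⟨ha1, ha2⟩ := ha
    obtain ⟨hb1, hb2⟩ := hb
    simp only [Bool.and_eq_true, decide_eq_true_eq] at ha2 hb2
    have hao : a ∈ ord := (PySem.Set.mem_ofList ord a).mp ha1
    have hbo : b ∈ ord := (PySem.Set.mem_ofList ord b).mp hb1
    rw [pvKeyB_ord sl ord a hao, pvKeyB_ord sl ord b hbo, hq a ha2.2, hq b hb2.2]
    apply List.cons_lt_cons_self.mpr
    apply List.cons_lt_cons_self.mpr
    rw [List.cons_lt_cons_iff]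
    exact Or.inl (by exact_mod_cast hlt)
  · -- alphabetical block: string keys strictly increase
    have hsnd : (PySem.List.sorted (ks.filter q) pvStrKey false).Nodup :=
      (PySem.List.sorted_perm (ks.filter q) pvStrKey false).symm.nodup (hnd.filter q)
    have hle := (pvSorted_pairwise' (ks.filter q) pvStrKey).filter
      (fun n => !(PySem.Set.contains (PySem.Set.ofList ord) n))
    have hne : ((PySem.List.sorted (ks.filter q) pvStrKey false).filter
        (fun n => !(PySem.Set.contains (PySem.Set.ofList ord) n))).Pairwise (fun a b => a ≠ b) :=
      hsnd.filter _
    refine (hle.and hne).imp_of_mem ?_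
    intro a b ha hb hab
    obtain ⟨hab1, hab2⟩ := hab
    rw [List.mem_filter] at ha hb
    obtain ⟨ha1, ha2⟩ := ha
    obtain ⟨hb1, hb2⟩ := hb
    have hqa : q a = true := ((List.mem_filter).mp ((PySem.List.mem_sorted _ _ _ _).mp ha1)).2
    have hqb : q b = true := ((List.mem_filter).mp ((PySem.List.mem_sorted _ _ _ _).mp hb1)).2
    have hao : a ∉ ord := by
      intro hmem
      rw [(PySem.Set.contains_iff _ _).mpr ((PySem.Set.mem_ofList ord a).mpr hmem)] at ha2
      cases ha2
    have hbo : b ∉ ord := by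
      intro hmem
      rw [(PySem.Set.contains_iff _ _).mpr ((PySem.Set.mem_ofList ord b).mpr hmem)] at hb2
      cases hb2
    rw [pvKeyB_alpha sl ord a hao, pvKeyB_alpha sl ord b hbo, hq a hqa, hq b hqb]
    simp only [List.cons_append, List.nil_append]
    apply List.cons_lt_cons_self.mpr
    apply List.cons_lt_cons_self.mpr
    apply List.cons_lt_cons_self.mpr
    exact lt_of_le_of_ne hab1 (fun h => hab2 (pvStrKey_inj a b h))
  · -- ordered block before alphabetical block
    intro a ha b hb
    rw [List.mem_filter] at ha hb
    obtain ⟨ha1, ha2⟩ := ha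
    obtain ⟨hb1, hb2⟩ := hb
    simp only [Bool.and_eq_true, decide_eq_true_eq] at ha2
    have hqa : q a = true := ha2.2
    have hqb : q b = true := ((List.mem_filter).mp ((PySem.List.mem_sorted _ _ _ _).mp hb1)).2
    have hao : a ∈ ord := (PySem.Set.mem_ofList ord a).mp ha1
    have hbo : b ∉ ord := by
      intro hmem
      rw [(PySem.Set.contains_iff _ _).mpr ((PySem.Set.mem_ofList ord b).mpr hmem)] at hb2
      cases hb2
    rw [pvKeyB_ord sl ord a hao, pvKeyB_alpha sl ord b hbo, hq a hqa, hq b hqb]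
    simp only [List.cons_append, List.nil_append]
    apply List.cons_lt_cons_self.mpr
    rw [List.cons_lt_cons_iff]
    exact Or.inl (by norm_num)

theorem pvNames_pairwise (apps : List (String × String)) (ord sl : List String)
    (hnd : (apps.map Prod.fst).Nodup) :
    (pvNames apps ord sl).Pairwise
      (fun a b => pvKeyB (PySem.Set.ofList sl) (pvOrderPosD ord) a
        < pvKeyB (PySem.Set.ofList sl) (pvOrderPosD ord) b) := by
  unfold pvNames
  rw [List.pairwise_append]
  refine ⟨?_, ?_, ?_⟩
  · exact pvGroup_pairwise apps ord sl _ 0 (fun n h => by simp only [h, if_true]) hnd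
  · refine pvGroup_pairwise apps ord sl _ 1 (fun n h => ?_) hnd
    rw [Bool.not_eq_true'] at h
    simp only [h, Bool.false_eq_true, if_false]
  · intro a ha b hb
    have hqa : PySem.Set.contains (PySem.Set.ofList sl) a = true :=
      (pvGroupNames_mem apps ord _ a ha).2
    have hqb' := (pvGroupNames_mem apps ord _ b hb).2
    have hqb : PySem.Set.contains (PySem.Set.ofList sl) b = false := by
      rw [Bool.not_eq_true'] at hqb'
      exact hqb'
    obtain ⟨ta, hta⟩ := pvKeyB_head sl ord a
    obtain ⟨tb, htb⟩ := pvKeyB_head sl ord b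
    rw [hta, htb, hqa, hqb]
    simp only [if_true, Bool.false_eq_true, if_false]
    rw [List.cons_lt_cons_iff]
    exact Or.inl (by norm_num)

-- the single composite-key sort equals the four-block concatenation
theorem pvSorted_eq (apps : List (String × String)) (ord sl : List String)
    (hnd : (apps.map Prod.fst).Nodup) :
    PySem.List.sorted (apps.map Prod.fst) (pvKeyB (PySem.Set.ofList sl) (pvOrderPosD ord))
      = pvNames apps ord sl :=
  pvSorted_eq_of_perm_of_pairwise_lt' _ _ _
    (pvNames_perm apps ord sl hnd) (pvNames_pairwise apps ord sl hnd)

-- A's per-group result (with its dict-truthiness guard) as a map over the group's name list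
theorem pvAGroupItems (apps : List (String × String)) (ord : List String) (q : String → Bool)
    (hnd : (apps.map Prod.fst).Nodup) :
    (if (PySem.Dict.mk (apps.filter (fun x => q x.1))).items.isEmpty then PySem.Dict.empty
     else pvOrderAppsA (PySem.Dict.mk (apps.filter (fun x => q x.1))) ord).items
    = (pvGroupNames apps ord q).map (fun n => (n, ((PySem.Dict.mk apps).get? n).getD "")) := by
  set ks := apps.map Prod.fst with hks
  set d := PySem.Dict.mk (apps.filter (fun x => q x.1)) with hd
  have hkeys : d.keys = ks.filter q := by
    rw [hd, PySem.Dict.keys_mk, hks, List.filter_map]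
    rfl
  have hknd : d.keys.Nodup := by rw [hkeys]; exact hnd.filter q
  by_cases hemp : d.items.isEmpty = true
  · have hnil : apps.filter (fun x => q x.1) = [] := List.isEmpty_iff.mp hemp
    have hksnil : ks.filter q = [] := by
      rw [hks, List.filter_map]
      show List.map Prod.fst (List.filter (fun x => q x.1) apps) = []
      rw [hnil]
      rfl
    simp only [hemp, if_true]
    have h1 : (PySem.Set.ofList ord).filter (fun n => decide (n ∈ ks) && q n) = [] := by
      rw [List.filter_eq_nil_iff]
      intro n _ hcon
      simp only [Bool.and_eq_true, decide_eq_true_eq] at hcon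
      have : n ∈ ks.filter q := List.mem_filter.mpr ⟨hcon.1, hcon.2⟩
      rw [hksnil] at this
      simp at this
    have h2 : PySem.List.sorted (ks.filter q) pvStrKey = [] := by
      rw [hksnil]
      exact (PySem.List.sorted_eq_nil_iff [] pvStrKey false).mpr rfl
    unfold pvGroupNames
    rw [← hks, h1, h2]
    simp [PySem.Dict.empty]
  · simp only [hemp, Bool.false_eq_true, if_false]
    rw [pvOrderAppsA_items d hknd ord, hkeys]
    unfold pvGroupNames
    rw [← hks, List.map_append]
    congr 1
    · -- ordered part
      rw [List.filter_congr (fun n hn => ?_)]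
      · apply List.map_congr_left
        intro n hn
        rw [List.mem_filter] at hn
        obtain ⟨-, hn2⟩ := hn
        simp only [Bool.and_eq_true, decide_eq_true_eq] at hn2
        rw [hd, pvGet?_mk_filter apps q n hn2.2]
      · -- d.contains n = (decide (n ∈ ks) && q n)
        rw [PySem.Dict.contains_eq_decide_mem_keys, hkeys]
        by_cases h : n ∈ ks.filter q
        · rw [List.mem_filter] at h
          simp [h.1, h.2]
        · rw [List.mem_filter] at h
          push_neg at h
          by_cases hmem : n ∈ ks
          · have := h hmem
            simp [hmem, List.mem_filter, this]
          · simp [hmem, List.mem_filter]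
    · -- alphabetical part
      apply List.map_congr_left
      intro n hn
      rw [List.mem_filter] at hn
      obtain ⟨hn1, -⟩ := hn
      have hq : q n = true := ((List.mem_filter).mp ((PySem.List.mem_sorted _ _ _ _).mp hn1)).2
      rw [hd, pvGet?_mk_filter apps q n hq]

-- B's rebuild of the dict over the sorted names, as a map over pvNames
theorem pvBItems (apps : List (String × String)) (ord sl : List String)
    (hnd : (apps.map Prod.fst).Nodup) :
    ((PySem.List.sorted (apps.map Prod.fst) (pvKeyB (PySem.Set.ofList sl) (pvOrderPosD ord))).foldl
       (pvOrdStep (PySem.Dict.mk apps)) PySem.Dict.empty).items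
    = (pvNames apps ord sl).map (fun n => (n, ((PySem.Dict.mk apps).get? n).getD "")) := by
  rw [pvSorted_eq apps ord sl hnd]
  have hnnd : (pvNames apps ord sl).Nodup := (pvNames_perm apps ord sl hnd).symm.nodup hnd
  rw [pvFoldOrd_items (PySem.Dict.mk apps) (pvNames apps ord sl) hnnd PySem.Dict.empty
      (fun n _ => PySem.Dict.contains_empty n)]
  have hfil : (pvNames apps ord sl).filter (fun n => (PySem.Dict.mk apps).contains n)
      = pvNames apps ord sl := by
    rw [List.filter_eq_self]
    intro n hn
    have hmem : n ∈ apps.map Prod.fst := ((pvNames_perm apps ord sl hnd).mem_iff).mp hn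
    rw [PySem.Dict.contains_eq_decide_mem_keys]
    have : (PySem.Dict.mk apps).keys = apps.map Prod.fst := by
      rw [PySem.Dict.keys_mk]
    rw [this]
    simpa using hmem
  rw [hfil]
  rfl

-- A's two result.update loops concatenate the two group item lists
theorem pvACombine (l1 l2 : List (String × String))
    (hnd : (l1.map Prod.fst ++ l2.map Prod.fst).Nodup) :
    (l2.foldl (fun r p => r.insert p.1 p.2)
      (l1.foldl (fun r p => r.insert p.1 p.2) PySem.Dict.empty)).items = l1 ++ l2 := by
  have hnd1 : (l1.map Prod.fst).Nodup := (List.nodup_append.mp hnd).1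
  have hnd2 : (l2.map Prod.fst).Nodup := (List.nodup_append.mp hnd).2.1
  have hdisj : ∀ a ∈ l1.map Prod.fst, a ∉ l2.map Prod.fst := by
    intro a ha hb
    exact (List.nodup_append.mp hnd).2.2 a ha a hb rfl
  have h1 : (l1.foldl (fun r p => r.insert p.1 p.2) PySem.Dict.empty).items = [] ++ l1 :=
    pvCombine_items l1 PySem.Dict.empty (fun x _ => PySem.Dict.contains_empty x.1) hnd1
  have hkeys1 : (l1.foldl (fun r p => r.insert p.1 p.2) PySem.Dict.empty).keys = l1.map Prod.fst := by
    simp only [PySem.Dict.keys, h1, List.nil_append]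
  have h2 := pvCombine_items l2 (l1.foldl (fun r p => r.insert p.1 p.2) PySem.Dict.empty)
    (fun x hx => by
      rw [PySem.Dict.contains_eq_decide_mem_keys, hkeys1]
      have : x.1 ∉ l1.map Prod.fst := by
        intro hxin
        exact hdisj x.1 hxin (List.mem_map_of_mem hx)
      simpa using this) hnd2
  rw [h2, h1]
  simp

-- ===== VERDICT (by name: the statement is the Claim_ definition above) =====
theorem apply_app_order_spec : Claim_equal_apply_app_order := by
  unfold Claim_equal_apply_app_order
  intro apps config _ hpre
  unfold Spec_apply_app_order
  unfold Pre_apply_app_order at hpre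
  simp only [apply_app_order, apply_app_order_alt]
  set cfgApps : List (String × List String) := (PySem.Dict.mk config).getD "apps" [] with hcfg
  set ord : List String := (PySem.Dict.mk cfgApps).getD "order" [] with hordd
  set sl : List String := (PySem.Dict.mk cfgApps).getD "starred" [] with hsld
  -- A side: partition
  have hpart := pvPartition_eq (fun n => PySem.Set.contains (PySem.Set.ofList sl) n) apps
    PySem.Dict.empty PySem.Dict.empty
    (fun x _ => PySem.Dict.contains_empty x.1) (fun x _ => PySem.Dict.contains_empty x.1) hpre
  rw [hpart]
  have hpe : (PySem.Dict.empty : PySem.Dict String String).items = [] := rfl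
  simp only [hpe, List.nil_append]
  -- A side: the two groups
  have hA1 := pvAGroupItems apps ord (fun n => PySem.Set.contains (PySem.Set.ofList sl) n) hpre
  have hA2 := pvAGroupItems apps ord (fun n => !PySem.Set.contains (PySem.Set.ofList sl) n) hpre
  simp only [hA1, hA2]
  -- A side: combining
  set v : String → String × String := fun n => (n, ((PySem.Dict.mk apps).get? n).getD "") with hv
  have hmapfst : ∀ (L : List String), (L.map v).map Prod.fst = L := by
    intro L
    rw [List.map_map]
    simp [hv, Function.comp_def]
  have hnames : (pvNames apps ord sl).Nodup := (pvNames_perm apps ord sl hpre).symm.nodup hpre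
  have hndapp : (((pvGroupNames apps ord (fun n => PySem.Set.contains (PySem.Set.ofList sl) n)).map v).map Prod.fst
      ++ ((pvGroupNames apps ord (fun n => !PySem.Set.contains (PySem.Set.ofList sl) n)).map v).map Prod.fst).Nodup := by
    rw [hmapfst, hmapfst]
    exact hnames
  rw [pvACombine ((pvGroupNames apps ord (fun n => PySem.Set.contains (PySem.Set.ofList sl) n)).map v)
    ((pvGroupNames apps ord (fun n => !PySem.Set.contains (PySem.Set.ofList sl) n)).map v) hndapp]
  -- B side
  have hkeysmk : ({items := apps} : PySem.Dict String String).keys = apps.map Prod.fst := by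
    rw [PySem.Dict.keys_mk]
  have hB : (fun (r : PySem.Dict String String) n =>
      match ({items := apps} : PySem.Dict String String).get? n with
      | some w => r.insert n w
      | none => r) = pvOrdStep (PySem.Dict.mk apps) := rfl
  have hop : (List.foldl (fun (d : PySem.Dict String Int) p => if d.contains p.2 = true then d else d.insert p.2 p.1)
      PySem.Dict.empty (PySem.List.enumerate ord)) = pvOrderPosD ord := rfl
  rw [hkeysmk, hop, hB, pvBItems apps ord sl hpre]
  unfold pvNames
  rw [List.map_append]
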